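-- pv_equiv track=rewrite | github.com/roderickmajoor/Thesis | scripts/compare_GT_loghi.py | count_matching_words
-- ===== SOURCE A (Python) =====
-- def count_matching_words(list1, list2):
--     # Convert lists to dictionaries to count occurrences
--     dict1 = {}
--     dict2 = {}
--
--     # Count occurrences in list 1
--     for word in list1:
--         dict1[word] = dict1.get(word, 0) + 1
--
--     # Count occurrences in list 2
--     for word in list2:
--         dict2[word] = dict2.get(word, 0) + 1
--
--     # Find the intersection of the two dictionaries
--     matching_words = set(dict1.keys()).intersection(set(dict2.keys()))
--
--     # Count the occurrences based on the minimum count in both lists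
--     total_count = sum(min(dict1.get(word, 0), dict2.get(word, 0)) for word in matching_words)
--
--     return total_count
-- ===== SOURCE B (Python) =====
-- def count_matching_words(list1, list2):
--     # Single-dictionary consuming pass: count list1 once, then walk list2,
--     # consuming one credit per matched word.
--     remaining = {}
--     for word in list1:
--         remaining[word] = remaining.get(word, 0) + 1
--     total_count = 0
--     for word in list2:
--         if remaining.get(word, 0) > 0:
--             remaining[word] = remaining[word] - 1
--             total_count += 1
--     return total_count
-- ===== Notes on version B (the rewrite author's own statement) =====
-- stated objective: simpler
-- what changed: Replaces the two frequency dictionaries, the set intersection of their key sets and the sum-of-min comprehension by one frequency dictionary for list1 and a single consuming pass over list2 that decrements a credit and counts each match.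
import Mathlib
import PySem

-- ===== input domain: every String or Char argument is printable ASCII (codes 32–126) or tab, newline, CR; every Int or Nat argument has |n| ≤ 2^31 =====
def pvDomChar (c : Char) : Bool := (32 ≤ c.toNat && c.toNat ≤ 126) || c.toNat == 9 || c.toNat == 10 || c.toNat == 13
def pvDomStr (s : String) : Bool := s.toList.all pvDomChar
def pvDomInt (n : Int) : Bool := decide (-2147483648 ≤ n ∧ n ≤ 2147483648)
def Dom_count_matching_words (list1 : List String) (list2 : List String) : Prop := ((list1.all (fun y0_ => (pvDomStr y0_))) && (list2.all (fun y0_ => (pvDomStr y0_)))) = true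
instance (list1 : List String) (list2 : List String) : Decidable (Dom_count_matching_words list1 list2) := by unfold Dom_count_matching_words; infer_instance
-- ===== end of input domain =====

-- B replaces A's two dictionaries + set intersection + sum-of-min by one frequency
-- dictionary for list1 and a single consuming pass over list2 (objective: simpler).

-- ===== PORT A =====
def count_matching_words (list1 : List String) (list2 : List String) : Int :=
  let dict1 : PySem.Dict String Int :=
    list1.foldl (fun d word => d.insert word (d.getD word 0 + 1)) PySem.Dict.empty
  let dict2 : PySem.Dict String Int :=
    list2.foldl (fun d word => d.insert word (d.getD word 0 + 1)) PySem.Dict.empty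
  let matching_words : PySem.Set String :=
    PySem.Set.inter (PySem.Set.ofList dict1.keys) (PySem.Set.ofList dict2.keys)
  -- sum(min(dict1.get(word, 0), dict2.get(word, 0)) for word in matching_words)
  -- (order of iteration over the set is irrelevant: Int addition is commutative)
  matching_words.foldl (fun acc word => acc + min (dict1.getD word 0) (dict2.getD word 0)) 0

-- ===== PORT B =====
def count_matching_words_alt (list1 : List String) (list2 : List String) : Int :=
  let remaining : PySem.Dict String Int :=
    list1.foldl (fun d word => d.modify word 0 (· + 1)) PySem.Dict.empty
  (list2.foldl
    (fun (st : PySem.Dict String Int × Int) word =>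
      if st.1.getD word 0 > 0 then (st.1.insert word (st.1.getD word 0 - 1), st.2 + 1)
      else st)
    (remaining, 0)).2

-- ===== PRECONDITION & SPEC =====
def Spec_count_matching_words (list1 : List String) (list2 : List String) (out : Int) : Prop := out = count_matching_words_alt list1 list2
instance (list1 : List String) (list2 : List String) (out : Int) : Decidable (Spec_count_matching_words list1 list2 out) := by unfold Spec_count_matching_words; infer_instance

-- ===== CLAIM (what is proved, stated in full; the proofs are below) =====
def Claim_equal_count_matching_words : Prop := ∀ (list1 : List String) (list2 : List String), Dom_count_matching_words list1 list2 → Spec_count_matching_words list1 list2 (count_matching_words list1 list2)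

-- ===== LEMMAS AND PROOFS =====

-- Abstract form of B's consuming pass: `c` is the remaining-credit function.
def pvConsume : (String → Int) → List String → Int
  | _, [] => 0
  | c, w :: ws =>
    if 0 < c w then 1 + pvConsume (Function.update c w (c w - 1)) ws else pvConsume c ws

-- B's loop computes pvConsume of the dict's lookup function.
theorem pvB_loop (l : List String) (d : PySem.Dict String Int) (t : Int) :
    (l.foldl
      (fun (st : PySem.Dict String Int × Int) word =>
        if st.1.getD word 0 > 0 then (st.1.insert word (st.1.getD word 0 - 1), st.2 + 1)
        else st) (d, t)).2 = t + pvConsume (fun v => d.getD v 0) l := by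
  induction l generalizing d t with
  | nil => simp [pvConsume]
  | cons w ws ih =>
    simp only [List.foldl_cons]
    by_cases h : 0 < d.getD w 0
    · have hupd : (fun v => (d.insert w (d.getD w 0 - 1)).getD v 0)
          = Function.update (fun v => d.getD v 0) w (d.getD w 0 - 1) := by
        funext v
        by_cases hv : v = w
        · subst hv; simp [PySem.Dict.getD_insert_self, Function.update_self]
        · simp [PySem.Dict.getD_insert_of_ne, hv]
      simp only [gt_iff_lt, h, if_pos, pvConsume, ih, hupd]
      ring
    · simp only [gt_iff_lt, h, pvConsume, ih, if_false]

-- pvConsume equals the sum of min(credits, multiplicity) over any finite superset.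
theorem pvConsume_eq_sum (l : List String) (c : String → Int) (hc : ∀ w, 0 ≤ c w)
    (F : Finset String) (hF : ∀ w ∈ l, w ∈ F) :
    pvConsume c l = ∑ w ∈ F, min (c w) ((l.count w : Int)) := by
  induction l generalizing c with
  | nil =>
    rw [pvConsume]
    exact (Finset.sum_eq_zero fun x _ => by simp [min_eq_right (hc x)]).symm
  | cons w ws ih =>
    have hwF : w ∈ F := hF w (by simp)
    have hFws : ∀ v ∈ ws, v ∈ F := fun v hv => hF v (by simp [hv])
    have hcount : ∀ v : String, ((w :: ws).count v : Int)
        = (ws.count v : Int) + (if v = w then 1 else 0) := by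
      intro v
      by_cases hv : v = w
      · subst hv
        simp
      · have hv' : ¬w = v := fun h => hv h.symm
        simp [hv, hv']
    by_cases h : 0 < c w
    · have hc' : ∀ v, 0 ≤ Function.update c w (c w - 1) v := by
        intro v
        by_cases hv : v = w
        · subst hv; simp [Function.update_self]; omega
        · simp [Function.update_of_ne hv]; exact hc v
      rw [pvConsume, if_pos h, ih (Function.update c w (c w - 1)) hc' hFws]
      rw [← Finset.add_sum_erase F _ hwF, ← Finset.add_sum_erase F
        (fun v => min (c v) ((w :: ws).count v : Int)) hwF]
      have hterm : min (c w) (((w :: ws).count w : Int))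
          = 1 + min (Function.update c w (c w - 1) w) ((ws.count w : Int)) := by
        have h1 : (0 : Int) ≤ (ws.count w : Int) := Int.natCast_nonneg _
        rw [hcount w, Function.update_self]
        norm_num
        omega
      have hrest : ∑ v ∈ F.erase w, min (Function.update c w (c w - 1) v) ((ws.count v : Int))
          = ∑ v ∈ F.erase w, min (c v) (((w :: ws).count v : Int)) := by
        apply Finset.sum_congr rfl
        intro v hv
        have hvw : v ≠ w := Finset.ne_of_mem_erase hv
        rw [Function.update_of_ne hvw, hcount v, if_neg hvw, add_zero]
      rw [hterm, hrest]
      ring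
    · have hw0 : c w = 0 := le_antisymm (not_lt.mp h) (hc w)
      rw [pvConsume, if_neg h, ih c hc hFws]
      apply Finset.sum_congr rfl
      intro v _
      by_cases hv : v = w
      · subst hv
        rw [hcount v, if_pos rfl, hw0]
        have : (0 : Int) ≤ (ws.count v : Int) := Int.natCast_nonneg _
        omega
      · rw [hcount v, if_neg hv, add_zero]

-- A's value is the sum of min of the two multiplicities over all words occurring anywhere.
theorem pvA_char (list1 list2 : List String) :
    count_matching_words list1 list2
      = ∑ w ∈ (list1 ++ list2).toFinset, min ((list1.count w : Int)) ((list2.count w : Int)) := by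
  unfold count_matching_words
  rw [PySem.Dict.foldl_insert_getD_add_one_eq_counter,
      PySem.Dict.foldl_insert_getD_add_one_eq_counter]
  simp only [PySem.Dict.keys_counter, PySem.Dict.getD_counter]
  rw [PySem.Set.ofList_ofList, PySem.Set.ofList_ofList]
  rw [PySem.List.foldl_add]
  set m : PySem.Set String := PySem.Set.inter (PySem.Set.ofList list1) (PySem.Set.ofList list2)
    with hm
  have hnd : m.Nodup := PySem.Set.nodup_inter _ _ (PySem.Set.nodup_ofList _)
  rw [zero_add, ← List.sum_toFinset _ hnd]
  apply Finset.sum_subset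
  · intro v hv
    rw [List.mem_toFinset] at hv ⊢
    rw [hm, PySem.Set.mem_inter, PySem.Set.mem_ofList, PySem.Set.mem_ofList] at hv
    simp [hv.1]
  · intro v _ hv
    rw [List.mem_toFinset, hm, PySem.Set.mem_inter, PySem.Set.mem_ofList,
        PySem.Set.mem_ofList] at hv
    rcases not_and_or.mp hv with h1 | h2
    · rw [List.count_eq_zero_of_not_mem h1]
      have : (0 : Int) ≤ (list2.count v : Int) := Int.natCast_nonneg _
      omega
    · rw [List.count_eq_zero_of_not_mem h2]
      have : (0 : Int) ≤ (list1.count v : Int) := Int.natCast_nonneg _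
      omega

-- ===== VERDICT (by name: the statement is the Claim_ definition above) =====
theorem count_matching_words_spec : Claim_equal_count_matching_words := by
  intro list1 list2 _
  unfold Spec_count_matching_words count_matching_words_alt
  rw [pvB_loop, ← PySem.Dict.counter_eq_foldl]
  have hgetD : (fun v => (PySem.Dict.counter list1).getD v 0)
      = fun v => ((list1.count v : Int)) := by
    funext v; exact PySem.Dict.getD_counter _ _
  rw [hgetD, zero_add, pvA_char,
      pvConsume_eq_sum list2 _ (fun w => Int.natCast_nonneg _) (list1 ++ list2).toFinset
        (fun w hw => by simp [hw])]
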